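-- pv_equiv track=rewrite | github.com/baddyscience/develop | algorithmTopic/最小替换子串长度.py | solution
-- ===== SOURCE A (Python) =====
-- def solution(input):
--     n = len(input)
--     target_freq = n // 4
--
--     freq = {'A': 0, 'S': 0, 'D': 0, 'F': 0}
--     for char in input:
--         freq[char] += 1
--
--     if all(freq[char] == target_freq for char in 'ASDF'):
--         return 0
--
--     left = 0
--     right = 0
--     min_length = n
--
--     window_freq = {'A': 0, 'S': 0, 'D': 0, 'F': 0}
--
--     while right < n:
--         window_freq[input[right]] += 1
--         right += 1
--
--         while all(freq[char] - window_freq[char] <= target_freq for char in 'ASDF'):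
--             min_length = min(min_length, right - left)
--             window_freq[input[left]] -= 1
--             left += 1
--
--     return min_length
-- ===== SOURCE B (Python) =====
-- def solution(input):
--     n = len(input)
--     target_freq = n // 4
--     freq = {'A': 0, 'S': 0, 'D': 0, 'F': 0}
--     for char in input:
--         freq[char] += 1
--     if all(freq[c] == target_freq for c in 'ASDF'):
--         return 0
--
--     def feasible(L):
--         # does some window of length L leave every remaining count <= target_freq?
--         window = {'A': 0, 'S': 0, 'D': 0, 'F': 0}
--         for j in range(L):
--             window[input[j]] += 1
--         if all(freq[c] - window[c] <= target_freq for c in 'ASDF'):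
--             return True
--         for j in range(L, n):
--             window[input[j]] += 1
--             window[input[j - L]] -= 1
--             if all(freq[c] - window[c] <= target_freq for c in 'ASDF'):
--                 return True
--         return False
--
--     lo, hi = 0, n
--     while lo < hi:
--         mid = (lo + hi) // 2
--         if feasible(mid):
--             hi = mid
--         else:
--             lo = mid + 1
--     return lo
-- ===== Notes on version B (the rewrite author's own statement) =====
-- stated objective: alternative
-- what changed: Replaces the two-pointer shrink-the-window scan by a binary search over the answer length with a fixed-size sliding-window feasibility decision procedure.
import Mathlib
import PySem

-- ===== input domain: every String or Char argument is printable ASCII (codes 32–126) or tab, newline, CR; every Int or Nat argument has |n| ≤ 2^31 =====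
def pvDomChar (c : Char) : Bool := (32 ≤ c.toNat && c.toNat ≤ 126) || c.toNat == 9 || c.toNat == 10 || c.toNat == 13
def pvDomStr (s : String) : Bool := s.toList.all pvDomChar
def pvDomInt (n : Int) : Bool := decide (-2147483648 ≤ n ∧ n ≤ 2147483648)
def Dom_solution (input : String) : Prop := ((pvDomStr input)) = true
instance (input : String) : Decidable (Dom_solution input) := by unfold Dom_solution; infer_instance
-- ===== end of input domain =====

-- B replaces A's two-pointer sliding-window scan by a binary search over the answer
-- length with a fixed-size sliding-window feasibility check; proved equal on strings
-- whose characters are all among A, S, D, F (both raise KeyError on any other character).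


-- ===== PORT A =====
-- shared boilerplate of both Pythons: the literal dict {'A':0,'S':0,'D':0,'F':0},
-- the `d[c] += delta` update (none = KeyError), the frequency-count loop and the
-- two `all(...)` comprehensions, transliterated once and used by both ports.
def asdf : List Char := ['A', 'S', 'D', 'F']

def initDict : PySem.Dict Char Int := PySem.Dict.ofList [('A', 0), ('S', 0), ('D', 0), ('F', 0)]

-- d[c] += delta  (KeyError → none)
def bump (d : PySem.Dict Char Int) (c : Char) (delta : Int) : Option (PySem.Dict Char Int) :=
  (d.get? c).map (fun v => d.insert c (v + delta))

-- for char in input: freq[char] += 1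
def buildFreq (l : List Char) : Option (PySem.Dict Char Int) :=
  l.foldl (fun acc c => acc.bind (fun d => bump d c 1)) (some initDict)

-- all(freq[char] == target_freq for char in 'ASDF')
def isBalanced (freq : PySem.Dict Char Int) (target : Int) : Bool :=
  asdf.all (fun c => freq.getD c 0 == target)

-- all(freq[char] - window_freq[char] <= target_freq for char in 'ASDF')
def condAll (freq w : PySem.Dict Char Int) (target : Int) : Bool :=
  asdf.all (fun c => freq.getD c 0 - w.getD c 0 ≤ target)

-- A's inner `while all(...)` loop; fuel only makes it total (never exhausted when
-- outer fuel = n+1 ≥ right - left + 1); returns (left, min_length, window_freq)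
def innerA (l : List Char) (freq : PySem.Dict Char Int) (target : Int) :
    Nat → Nat → Nat → Int → PySem.Dict Char Int → Option (Nat × Int × PySem.Dict Char Int)
  | 0, _, _, _, _ => none
  | fuel + 1, left, right, m, w =>
    if condAll freq w target then
      match l[left]? with
      | none => none      -- IndexError
      | some c =>
        (bump w c (-1)).bind (fun w' =>
          innerA l freq target fuel (left + 1) right (min m ((right : Int) - (left : Int))) w')
    else some (left, m, w)

-- A's outer `while right < n` loop
def outerA (l : List Char) (freq : PySem.Dict Char Int) (target : Int) :
    Nat → Nat → Nat → Int → PySem.Dict Char Int → Option Int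
  | 0, _, right, m, _ => if right < l.length then none else some m
  | fuel + 1, left, right, m, w =>
    if right < l.length then
      match l[right]? with
      | none => none
      | some c =>
        (bump w c 1).bind (fun w' =>
          (innerA l freq target (l.length + 1) left (right + 1) m w').bind
            (fun s => outerA l freq target fuel s.1 (right + 1) s.2.1 s.2.2))
    else some m

def solutionAux (l : List Char) : Option Int :=
  (buildFreq l).bind (fun freq =>
    let target := PySem.Int.floordiv (l.length : Int) 4
    if isBalanced freq target then some 0
    else outerA l freq target l.length 0 0 (l.length : Int) initDict)

def solution (input : String) : Int := (solutionAux input.toList).getD 0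

-- ===== PORT B =====
-- the warm-up loop `for j in range(L): window[input[j]] += 1`
def warmB (l : List Char) (L : Nat) : Option (PySem.Dict Char Int) :=
  (List.range L).foldl
    (fun acc j => acc.bind (fun w => (l[j]?).bind (fun c => bump w c 1))) (some initDict)

-- the sliding loop `for j in range(L, n): ...` with early `return True`
def slideB (l : List Char) (freq : PySem.Dict Char Int) (target : Int) (L : Nat) :
    List Nat → PySem.Dict Char Int → Option Bool
  | [], _ => some false
  | j :: js, w =>
    (l[j]?).bind (fun cIn =>
      (bump w cIn 1).bind (fun w1 =>
        (l[j - L]?).bind (fun cOut =>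
          (bump w1 cOut (-1)).bind (fun w2 =>
            if condAll freq w2 target then some true else slideB l freq target L js w2))))

-- feasible(L): some window of length L leaves every remaining count <= target
def feasibleB (l : List Char) (freq : PySem.Dict Char Int) (target : Int) (L : Nat) : Option Bool :=
  (warmB l L).bind (fun w =>
    if condAll freq w target then some true
    else slideB l freq target L (List.range' L (l.length - L)) w)

-- `while lo < hi: mid = (lo + hi) // 2 ...`; lo, hi are nonneg Python ints, kept as
-- Nat so (lo+hi)//2 is Nat division (= Python floor division on nonnegatives);
-- fuel n+1 only makes the loop total (hi - lo shrinks every iteration)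
def bsearchB (l : List Char) (freq : PySem.Dict Char Int) (target : Int) :
    Nat → Nat → Nat → Option Int
  | 0, lo, hi => if lo < hi then none else some (lo : Int)
  | fuel + 1, lo, hi =>
    if lo < hi then
      let mid := (lo + hi) / 2
      (feasibleB l freq target mid).bind (fun ok =>
        if ok then bsearchB l freq target fuel lo mid
        else bsearchB l freq target fuel (mid + 1) hi)
    else some (lo : Int)

def solutionAltAux (l : List Char) : Option Int :=
  (buildFreq l).bind (fun freq =>
    let target := PySem.Int.floordiv (l.length : Int) 4
    if isBalanced freq target then some 0
    else bsearchB l freq target (l.length + 1) 0 l.length)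

def solution_alt (input : String) : Int := (solutionAltAux input.toList).getD 0

-- ===== PRECONDITION & SPEC =====
-- A (and B) raise KeyError on any character other than A, S, D, F; Pre_ excludes exactly those inputs.
def Pre_solution (input : String) : Prop :=
  input.toList.all (fun c => c == 'A' || c == 'S' || c == 'D' || c == 'F') = true
instance (input : String) : Decidable (Pre_solution input) := by unfold Pre_solution; infer_instance

def pvWitness_solution : String := "ASDFA"

def Spec_solution (input : String) (out : Int) : Prop := out = solution_alt input
instance (input : String) (out : Int) : Decidable (Spec_solution input out) := by
  unfold Spec_solution; infer_instance

-- ===== CLAIM (what is proved, stated in full; the proofs are below) =====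
def Claim_equal_solution : Prop :=
  ∀ (input : String), Dom_solution input → Pre_solution input → Spec_solution input (solution input)

-- ===== LEMMAS AND PROOFS =====
-- prefix count
def cntC (l : List Char) (k : Nat) (c : Char) : Nat := (l.take k).count c

def tgt (l : List Char) : Int := ((l.length / 4 : Nat) : Int)

-- the remaining counts after deleting the window [i, j) are all <= target
def feas (l : List Char) (i j : Nat) : Prop :=
  ∀ c ∈ asdf, (l.count c : Int) + cntC l i c ≤ tgt l + cntC l j c

-- dict w has each ASDF key bound to g c
def DRepr (w : PySem.Dict Char Int) (g : Char → Int) : Prop :=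
  ∀ c ∈ asdf, w.get? c = some (g c)

lemma DRepr_congr {w : PySem.Dict Char Int} {g g' : Char → Int}
    (h : ∀ c ∈ asdf, g c = g' c) (hw : DRepr w g) : DRepr w g' := by
  intro c hc; rw [hw c hc, h c hc]

lemma DRepr_init : DRepr initDict (fun _ => 0) := by
  intro c hc; fin_cases hc <;> rfl

lemma bump_spec {w : PySem.Dict Char Int} {g : Char → Int} {c : Char} (hc : c ∈ asdf)
    (hw : DRepr w g) (delta : Int) :
    bump w c delta = some (w.insert c (g c + delta)) ∧
      DRepr (w.insert c (g c + delta)) (fun c' => if c' = c then g c + delta else g c') := by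
  constructor
  · simp [bump, hw c hc]
  · intro c' hc'
    rw [PySem.Dict.get?_insert]
    split_ifs with h
    · simp [h]
    · simp [h, hw c' hc']

lemma buildFreq_go {l : List Char} (hp : ∀ c ∈ l, c ∈ asdf) :
    ∀ (d : PySem.Dict Char Int) (g : Char → Int), DRepr d g →
      ∃ d', l.foldl (fun acc c => acc.bind (fun d => bump d c 1)) (some d) = some d' ∧
        DRepr d' (fun c => g c + l.count c) := by
  induction l with
  | nil => intro d g hd; exact ⟨d, rfl, DRepr_congr (by simp) hd⟩
  | cons c0 rest ih =>
    intro d g hd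
    have hc0 : c0 ∈ asdf := hp c0 (by simp)
    obtain ⟨hb, hr⟩ := bump_spec hc0 hd 1
    obtain ⟨d', hd', hrep⟩ := ih (fun c hc => hp c (by simp [hc])) _ _ hr
    refine ⟨d', by simpa [hb] using hd', DRepr_congr ?_ hrep⟩
    intro c hc
    simp only [List.count_cons]
    split_ifs with h <;> simp_all <;> ring

lemma buildFreq_spec {l : List Char} (hp : ∀ c ∈ l, c ∈ asdf) :
    ∃ F, buildFreq l = some F ∧ DRepr F (fun c => (l.count c : Int)) := by
  obtain ⟨F, hF, hrep⟩ := buildFreq_go hp initDict _ DRepr_init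
  exact ⟨F, hF, DRepr_congr (by simp) hrep⟩

lemma isBalanced_iff {F : PySem.Dict Char Int} {g : Char → Int} (hF : DRepr F g) (T : Int) :
    isBalanced F T = true ↔ ∀ c ∈ asdf, g c = T := by
  unfold isBalanced
  rw [List.all_eq_true]
  constructor <;> intro h c hc <;> have := h c hc
  · rwa [PySem.Dict.getD_eq_get?_getD, hF c hc, Option.getD_some, beq_iff_eq] at this
  · rw [PySem.Dict.getD_eq_get?_getD, hF c hc, Option.getD_some, beq_iff_eq]; exact this

lemma condAll_iff {F w : PySem.Dict Char Int} {gf gw : Char → Int}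
    (hF : DRepr F gf) (hw : DRepr w gw) (T : Int) :
    condAll F w T = true ↔ ∀ c ∈ asdf, gf c - gw c ≤ T := by
  unfold condAll
  rw [List.all_eq_true]
  constructor <;> intro h c hc <;> have := h c hc
  · rwa [PySem.Dict.getD_eq_get?_getD, PySem.Dict.getD_eq_get?_getD, hF c hc, hw c hc,
      Option.getD_some, Option.getD_some, decide_eq_true_eq] at this
  · rw [PySem.Dict.getD_eq_get?_getD, PySem.Dict.getD_eq_get?_getD, hF c hc, hw c hc,
      Option.getD_some, Option.getD_some, decide_eq_true_eq]; exact this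

lemma count_sum_asdf {l : List Char} (hp : ∀ c ∈ l, c ∈ asdf) :
    l.count 'A' + l.count 'S' + l.count 'D' + l.count 'F' = l.length := by
  induction l with
  | nil => simp
  | cons c0 rest ih =>
    have h0 : c0 ∈ asdf := hp c0 (by simp)
    have := ih (fun c hc => hp c (by simp [hc]))
    fin_cases h0 <;> simp <;> omega

lemma cntC_zero (l : List Char) (c : Char) : cntC l 0 c = 0 := rfl

lemma cntC_full (l : List Char) (c : Char) : cntC l l.length c = l.count c := by
  simp [cntC]

lemma cntC_mono (l : List Char) {i j : Nat} (h : i ≤ j) (c : Char) :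
    cntC l i c ≤ cntC l j c := by
  exact (List.take_sublist_take_left h).count_le c

lemma cntC_succ {l : List Char} {k : Nat} {ch : Char} (hk : l[k]? = some ch) (c : Char) :
    cntC l (k + 1) c = cntC l k c + (if ch = c then 1 else 0) := by
  unfold cntC
  rw [List.take_add_one, hk]
  by_cases h : ch = c <;> simp [h, List.count_append]

lemma feas_mono {l : List Char} {i i' j j' : Nat} (hi : i' ≤ i) (hj : j ≤ j')
    (h : feas l i j) : feas l i' j' := by
  intro c hc
  have := h c hc
  have h1 := cntC_mono l hi c
  have h2 := cntC_mono l hj c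
  omega

lemma feas_zero_full (l : List Char) : feas l 0 l.length := by
  intro c hc
  rw [cntC_zero, cntC_full]
  have : (0:Int) ≤ tgt l := by unfold tgt; positivity
  omega

lemma not_feas_self {l : List Char} (hp : ∀ c ∈ l, c ∈ asdf)
    (hnb : ¬ ∀ c ∈ asdf, (l.count c : Int) = tgt l) (k : Nat) : ¬ feas l k k := by
  intro hf
  apply hnb
  have hsum := count_sum_asdf hp
  have hb : ∀ c ∈ asdf, l.count c ≤ l.length / 4 := by
    intro c hc
    have := hf c hc
    have h2 : (l.count c : Int) ≤ ((l.length / 4 : Nat) : Int) := by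
      have := hf c hc; simp only [tgt] at this ⊢; omega
    exact_mod_cast h2
  have hA := hb 'A' (by simp [asdf])
  have hS := hb 'S' (by simp [asdf])
  have hD := hb 'D' (by simp [asdf])
  have hF := hb 'F' (by simp [asdf])
  intro c hc
  fin_cases hc <;> simp [tgt] <;> omega

def winG (l : List Char) (i j : Nat) : Char → Int :=
  fun c => (cntC l j c : Int) - cntC l i c

lemma condAll_feas_iff {l : List Char} {F w : PySem.Dict Char Int} {i j : Nat}
    (hF : DRepr F (fun c => (l.count c : Int))) (hw : DRepr w (winG l i j)) :
    condAll F w (tgt l) = true ↔ feas l i j := by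
  rw [condAll_iff hF hw]
  unfold winG feas
  constructor <;> intro h c hc <;> have := h c hc <;> omega

lemma winG_succ_right {l : List Char} {k : Nat} {ch : Char} (hk : l[k]? = some ch)
    (i : Nat) (c : Char) (hc : c ∈ asdf) :
    (if c = ch then winG l i k ch + 1 else winG l i k c) = winG l i (k + 1) c := by
  unfold winG
  have e := cntC_succ hk c
  split_ifs with h
  · subst h; simp at e; omega
  · rw [if_neg (fun hh => h hh.symm)] at e; omega

lemma winG_succ_left {l : List Char} {k : Nat} {ch : Char} (hk : l[k]? = some ch)
    (j : Nat) (c : Char) (hc : c ∈ asdf) :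
    (if c = ch then winG l k j ch + (-1) else winG l k j c) = winG l (k + 1) j c := by
  unfold winG
  have e := cntC_succ hk c
  split_ifs with h
  · subst h; simp at e; omega
  · rw [if_neg (fun hh => h hh.symm)] at e; omega

lemma innerA_run {l : List Char} {F : PySem.Dict Char Int}
    (hp : ∀ c ∈ l, c ∈ asdf) (hF : DRepr F (fun c => (l.count c : Int)))
    (hnb : ∀ k, ¬ feas l k k) {r : Nat} (hr : r ≤ l.length) :
    ∀ (fuel left : Nat) (m : Int) (w : PySem.Dict Char Int), left ≤ r → r - left + 1 ≤ fuel →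
      DRepr w (winG l left r) →
      (∀ i : Nat, i < left → m ≤ (r : Int) - i) →
      (m = (l.length : Int) ∨ ∃ i j : Nat, i ≤ j ∧ j ≤ r ∧ feas l i j ∧ m = (j : Int) - i) →
      ∃ left' m' w', innerA l F (tgt l) fuel left r m w = some (left', m', w') ∧
        left' ≤ r ∧ ¬ feas l left' r ∧ DRepr w' (winG l left' r) ∧
        (∀ i : Nat, i < left' → m' ≤ (r : Int) - i) ∧
        (m' = (l.length : Int) ∨ ∃ i j : Nat, i ≤ j ∧ j ≤ r ∧ feas l i j ∧ m' = (j : Int) - i) ∧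
        m' ≤ m := by
  intro fuel
  induction fuel with
  | zero => intro left m w h1 h2 _ _ _; exact absurd h2 (by omega)
  | succ fuel ih =>
    intro left m w hlr hfuel hw hP3 hdisj
    by_cases hcond : condAll F w (tgt l) = true
    · have hfeas : feas l left r := (condAll_feas_iff hF hw).mp hcond
      have hlt : left < r := by
        rcases Nat.lt_or_ge left r with h | h
        · exact h
        · exfalso; exact hnb r (feas_mono (by omega) (le_refl r) hfeas)
      have hln : left < l.length := by omega
      have hgetl : l[left]? = some l[left] := List.getElem?_eq_getElem hln
      have hcmem : l[left] ∈ asdf := hp _ (List.getElem_mem hln)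
      obtain ⟨hb, hrep⟩ := bump_spec hcmem hw (-1)
      have hrep' : DRepr (w.insert l[left] (winG l left r l[left] + (-1))) (winG l (left + 1) r) :=
        DRepr_congr (fun c hc => winG_succ_left hgetl r c hc) hrep
      have hP3' : ∀ i : Nat, i < left + 1 → min m ((r : Int) - left) ≤ (r : Int) - i := by
        intro i hi
        rcases Nat.lt_or_ge i left with h | h
        · exact le_trans (min_le_left _ _) (hP3 i h)
        · have : i = left := by omega
          subst this; exact le_trans (min_le_right _ _) (by omega)
      have hdisj' : min m ((r : Int) - left) = (l.length : Int) ∨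
          ∃ i j : Nat, i ≤ j ∧ j ≤ r ∧ feas l i j ∧ min m ((r : Int) - left) = (j : Int) - i := by
        rcases le_total m ((r : Int) - left) with h | h
        · rw [min_eq_left h]; exact hdisj
        · rw [min_eq_right h]; exact Or.inr ⟨left, r, by omega, le_refl r, hfeas, rfl⟩
      have harg1 : left + 1 ≤ r := by omega
      have harg2 : r - (left + 1) + 1 ≤ fuel := by clear ih hrep' hdisj' hP3' hb hrep hgetl hcmem hw hP3 hdisj hF; omega
      obtain ⟨left', m', w', heq, h1, h2, h3, h4, h5, h6⟩ :=
        ih (left + 1) (min m ((r : Int) - left)) _ harg1 harg2 hrep' hP3' hdisj'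
      refine ⟨left', m', w', ?_, h1, h2, h3, h4, h5, le_trans h6 (min_le_left _ _)⟩
      rw [innerA, if_pos hcond, hgetl]
      simpa [hb] using heq
    · refine ⟨left, m, w, ?_, hlr, ?_, hw, hP3, hdisj, le_refl m⟩
      · rw [innerA, if_neg hcond]
      · intro hf; exact hcond ((condAll_feas_iff hF hw).mpr hf)

lemma outerA_run {l : List Char} {F : PySem.Dict Char Int}
    (hp : ∀ c ∈ l, c ∈ asdf) (hF : DRepr F (fun c => (l.count c : Int)))
    (hnb : ∀ k, ¬ feas l k k) :
    ∀ (fuel k left : Nat) (m : Int) (w : PySem.Dict Char Int), k ≤ l.length →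
      l.length - k ≤ fuel → left ≤ k →
      DRepr w (winG l left k) → ¬ feas l left k →
      (∀ i : Nat, i < left → m ≤ (k : Int) - i) →
      (m = (l.length : Int) ∨ ∃ i j : Nat, i ≤ j ∧ j ≤ k ∧ feas l i j ∧ m = (j : Int) - i) →
      (∀ i j : Nat, i ≤ j → j ≤ k → feas l i j → m ≤ (j : Int) - i) →
      ∃ m', outerA l F (tgt l) fuel left k m w = some m' ∧
        (m' = (l.length : Int) ∨
          ∃ i j : Nat, i ≤ j ∧ j ≤ l.length ∧ feas l i j ∧ m' = (j : Int) - i) ∧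
        (∀ i j : Nat, i ≤ j → j ≤ l.length → feas l i j → m' ≤ (j : Int) - i) := by
  intro fuel
  induction fuel with
  | zero =>
    intro k left m w hk hfuel hlk hw hnf hP3 hdisj hU
    have : k = l.length := by omega
    subst this
    exact ⟨m, by simp [outerA], hdisj, hU⟩
  | succ fuel ih =>
    intro k left m w hk hfuel hlk hw hnf hP3 hdisj hU
    by_cases hkn : k < l.length
    · have hgetk : l[k]? = some l[k] := List.getElem?_eq_getElem hkn
      have hcmem : l[k] ∈ asdf := hp _ (List.getElem_mem hkn)
      obtain ⟨hb, hrep⟩ := bump_spec hcmem hw 1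
      have hrep' : DRepr (w.insert l[k] (winG l left k l[k] + 1)) (winG l left (k + 1)) :=
        DRepr_congr (fun c hc => winG_succ_right hgetk left c hc) hrep
      obtain ⟨left', m', w', hinner, h1, h2, h3, h4, h5, h6⟩ :=
        innerA_run hp hF hnb (show k + 1 ≤ l.length by omega) (l.length + 1) left m _
          (show left ≤ k + 1 by omega) (show k + 1 - left + 1 ≤ l.length + 1 by omega) hrep'
          (by intro i hi; have := hP3 i hi; push_cast; push_cast at this; omega)
          (by rcases hdisj with h | ⟨i, j, a, b, c, d⟩
              · exact Or.inl h
              · exact Or.inr ⟨i, j, a, by omega, c, d⟩)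
      have hU' : ∀ i j : Nat, i ≤ j → j ≤ k + 1 → feas l i j → m' ≤ (j : Int) - i := by
        intro i j hij hj hf
        rcases Nat.lt_or_ge j (k + 1) with h | h
        · exact le_trans h6 (hU i j hij (by omega) hf)
        · have hj' : j = k + 1 := by omega
          subst hj'
          rcases Nat.lt_or_ge i left' with h' | h'
          · exact h4 i h'
          · exact absurd (feas_mono h' (le_refl (k + 1)) hf) h2
      have harg1 : k + 1 ≤ l.length := by omega
      have harg2 : l.length - (k + 1) ≤ fuel := by clear ih hrep' hU' hb hrep hgetk hcmem hw hP3 hdisj hU hF hinner h3 h4 h5; omega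
      obtain ⟨m'', hout, hA, hB⟩ :=
        ih (k + 1) left' m' w' harg1 harg2 h1 h3 h2 h4 h5 hU'
      refine ⟨m'', ?_, hA, hB⟩
      rw [outerA, if_pos hkn, hgetk]
      simpa [hb, hinner] using hout
    · have : k = l.length := by omega
      subst this
      exact ⟨m, by simp [outerA], hdisj, hU⟩

def MinLen (l : List Char) (m : Int) : Prop :=
  (∃ i j : Nat, i ≤ j ∧ j ≤ l.length ∧ feas l i j ∧ m = (j : Int) - i) ∧
  (∀ i j : Nat, i ≤ j → j ≤ l.length → feas l i j → m ≤ (j : Int) - i)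

lemma MinLen_unique {l : List Char} {m m' : Int} (h : MinLen l m) (h' : MinLen l m') : m = m' := by
  obtain ⟨⟨i, j, a, b, c, d⟩, hub⟩ := h
  obtain ⟨⟨i', j', a', b', c', d'⟩, hub'⟩ := h'
  have := hub i' j' a' b' c'
  have := hub' i j a b c
  omega

lemma outerA_isMin {l : List Char} {F : PySem.Dict Char Int}
    (hp : ∀ c ∈ l, c ∈ asdf) (hF : DRepr F (fun c => (l.count c : Int)))
    (hnb : ∀ k, ¬ feas l k k) :
    ∃ m, outerA l F (tgt l) l.length 0 0 (l.length : Int) initDict = some m ∧ MinLen l m := by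
  obtain ⟨m, hout, hdisj, hU⟩ :=
    outerA_run hp hF hnb l.length 0 0 (l.length : Int) initDict (by omega) (by omega) (by omega)
      (DRepr_congr (by intro c hc; simp [winG]) DRepr_init) (hnb 0)
      (by omega) (Or.inl rfl)
      (by
        intro i j hij hj hf
        have hj0 : j = 0 := by omega
        have hi0 : i = 0 := by omega
        subst hj0; subst hi0
        exact absurd hf (hnb 0))
  refine ⟨m, hout, ?_, hU⟩
  rcases hdisj with h | h
  · exact ⟨0, l.length, by omega, le_refl _, feas_zero_full l, by omega⟩
  · exact h

-- some window of length L is feasible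
def PFeas (l : List Char) (L : Nat) : Prop :=
  ∃ i : Nat, i + L ≤ l.length ∧ feas l i (i + L)

lemma PFeas_mono {l : List Char} {L L' : Nat} (h : L ≤ L') (h' : L' ≤ l.length)
    (hP : PFeas l L) : PFeas l L' := by
  obtain ⟨i, hi, hf⟩ := hP
  rcases Nat.le_total (i + L') l.length with hle | hgt
  · exact ⟨i, hle, feas_mono (le_refl i) (by omega) hf⟩
  · refine ⟨l.length - L', by omega, feas_mono (by omega) (by omega) hf⟩

lemma PFeas_full (l : List Char) : PFeas l l.length :=
  ⟨0, by omega, by simpa using feas_zero_full l⟩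

lemma warm_go {l : List Char} (hp : ∀ c ∈ l, c ∈ asdf) :
    ∀ (b a : Nat) (w : PySem.Dict Char Int), a + b ≤ l.length → DRepr w (winG l 0 a) →
      ∃ w', (List.range' a b).foldl
          (fun acc j => acc.bind (fun w => (l[j]?).bind (fun c => bump w c 1))) (some w) = some w' ∧
        DRepr w' (winG l 0 (a + b)) := by
  intro b
  induction b with
  | zero => intro a w _ hw; exact ⟨w, rfl, hw⟩
  | succ b ih =>
    intro a w hab hw
    have ha : a < l.length := by omega
    have hget : l[a]? = some l[a] := List.getElem?_eq_getElem ha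
    have hcm : l[a] ∈ asdf := hp _ (List.getElem_mem ha)
    obtain ⟨hb, hrep⟩ := bump_spec hcm hw 1
    have hrep' : DRepr (w.insert l[a] (winG l 0 a l[a] + 1)) (winG l 0 (a + 1)) :=
      DRepr_congr (fun c hc => winG_succ_right hget 0 c hc) hrep
    obtain ⟨w', hfold, hw'⟩ := ih (a + 1) _ (by omega) hrep'
    refine ⟨w', ?_, by simpa [show a + 1 + b = a + (b + 1) by omega] using hw'⟩
    rw [List.range'_succ, List.foldl_cons]
    simpa [hget, hb] using hfold

lemma warmB_spec {l : List Char} (hp : ∀ c ∈ l, c ∈ asdf) {L : Nat} (hL : L ≤ l.length) :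
    ∃ w, warmB l L = some w ∧ DRepr w (winG l 0 L) := by
  obtain ⟨w, hfold, hw⟩ := warm_go hp L 0 initDict (by omega)
    (DRepr_congr (by intro c hc; simp [winG]) DRepr_init)
  exact ⟨w, by simpa [warmB, List.range_eq_range'] using hfold, by simpa using hw⟩

lemma slideB_run {l : List Char} {F : PySem.Dict Char Int}
    (hp : ∀ c ∈ l, c ∈ asdf) (hF : DRepr F (fun c => (l.count c : Int))) {L : Nat} :
    ∀ (b j0 : Nat) (w : PySem.Dict Char Int), L ≤ j0 → j0 + b = l.length →
      DRepr w (winG l (j0 - L) j0) →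
      (∀ i : Nat, i + L ≤ j0 → ¬ feas l i (i + L)) →
      ∃ bres, slideB l F (tgt l) L (List.range' j0 b) w = some bres ∧
        (bres = true → PFeas l L) ∧
        (bres = false → ∀ i : Nat, i + L ≤ l.length → ¬ feas l i (i + L)) := by
  intro b
  induction b with
  | zero =>
    intro j0 w hLj hj0 hw hprev
    exact ⟨false, rfl, by simp, fun _ i hi => hprev i (by omega)⟩
  | succ b ih =>
    intro j0 w hLj hj0 hw hprev
    have hj0n : j0 < l.length := by omega
    have hget : l[j0]? = some l[j0] := List.getElem?_eq_getElem hj0n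
    have hcm : l[j0] ∈ asdf := hp _ (List.getElem_mem hj0n)
    obtain ⟨hb1, hrep1⟩ := bump_spec hcm hw 1
    have hrepIn : DRepr (w.insert l[j0] (winG l (j0 - L) j0 l[j0] + 1)) (winG l (j0 - L) (j0 + 1)) :=
      DRepr_congr (fun c hc => winG_succ_right hget (j0 - L) c hc) hrep1
    have houtn : j0 - L < l.length := by omega
    have hgeto : l[j0 - L]? = some l[j0 - L] := List.getElem?_eq_getElem houtn
    have hcmo : l[j0 - L] ∈ asdf := hp _ (List.getElem_mem houtn)
    obtain ⟨hb2, hrep2⟩ := bump_spec hcmo hrepIn (-1)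
    have heq1 : j0 - L + 1 = j0 + 1 - L := by omega
    have hrepOut : DRepr ((w.insert l[j0] (winG l (j0 - L) j0 l[j0] + 1)).insert (l[j0 - L])
        (winG l (j0 - L) (j0 + 1) (l[j0 - L]) + (-1))) (winG l (j0 + 1 - L) (j0 + 1)) := by
      rw [← heq1]
      exact DRepr_congr (fun c hc => winG_succ_left hgeto (j0 + 1) c hc) hrep2
    by_cases hcond : condAll F
        ((w.insert l[j0] (winG l (j0 - L) j0 l[j0] + 1)).insert (l[j0 - L])
          (winG l (j0 - L) (j0 + 1) (l[j0 - L]) + (-1))) (tgt l) = true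
    · have hfeas : feas l (j0 + 1 - L) (j0 + 1) := (condAll_feas_iff hF hrepOut).mp hcond
      refine ⟨true, ?_, fun _ => ⟨j0 + 1 - L, by omega, ?_⟩, by simp⟩
      · rw [List.range'_succ, slideB, hget]
        simp only [Option.bind_some]
        rw [hb1, Option.bind_some, hgeto, Option.bind_some, hb2, Option.bind_some, if_pos hcond]
      · have : j0 + 1 - L + L = j0 + 1 := by omega
        rw [this]; exact hfeas
    · have hprev' : ∀ i : Nat, i + L ≤ j0 + 1 → ¬ feas l i (i + L) := by
        intro i hi
        rcases Nat.lt_or_ge (i + L) (j0 + 1) with h | h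
        · exact hprev i (by omega)
        · have hieq : i = j0 + 1 - L := by omega
          rw [hieq, show j0 + 1 - L + L = j0 + 1 by omega]
          exact fun hf => hcond ((condAll_feas_iff hF hrepOut).mpr hf)
      obtain ⟨bres, hslide, hT, hFa⟩ := ih (j0 + 1) _ (by omega) (by omega) hrepOut hprev'
      refine ⟨bres, ?_, hT, hFa⟩
      rw [List.range'_succ, slideB, hget]
      simp only [Option.bind_some]
      rw [hb1, Option.bind_some, hgeto, Option.bind_some, hb2, Option.bind_some, if_neg hcond]
      exact hslide

lemma feasibleB_spec {l : List Char} {F : PySem.Dict Char Int}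
    (hp : ∀ c ∈ l, c ∈ asdf) (hF : DRepr F (fun c => (l.count c : Int))) {L : Nat}
    (hL : L ≤ l.length) :
    ∃ bres, feasibleB l F (tgt l) L = some bres ∧ (bres = true ↔ PFeas l L) := by
  obtain ⟨w0, hwarm, hw0⟩ := warmB_spec hp hL
  by_cases hcond : condAll F w0 (tgt l) = true
  · have hfeas : feas l 0 L := by
      have := (condAll_feas_iff hF (by simpa using hw0)).mp hcond
      simpa using this
    exact ⟨true, by rw [feasibleB, hwarm, Option.bind_some, if_pos hcond],
      by simp; exact ⟨0, by omega, by simpa using hfeas⟩⟩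
  · have hprev : ∀ i : Nat, i + L ≤ L → ¬ feas l i (i + L) := by
      intro i hi hf
      have hi0 : i = 0 := by omega
      subst hi0
      exact hcond ((condAll_feas_iff hF (by simpa using hw0)).mpr (by simpa using hf))
    obtain ⟨bres, hslide, hT, hFa⟩ := slideB_run hp hF (l.length - L) L w0 (le_refl L)
      (by omega) (by simpa using hw0) hprev
    refine ⟨bres, ?_, ?_⟩
    · rw [feasibleB, hwarm, Option.bind_some, if_neg hcond]; exact hslide
    · constructor
      · exact hT
      · intro hP
        cases bres with
        | true => rfl
        | false =>
          exfalso
          obtain ⟨i, hi, hf⟩ := hP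
          exact hFa rfl i hi hf

lemma bsearchB_run {l : List Char} {F : PySem.Dict Char Int}
    (hp : ∀ c ∈ l, c ∈ asdf) (hF : DRepr F (fun c => (l.count c : Int))) :
    ∀ (fuel lo hi : Nat), lo ≤ hi → hi ≤ l.length → hi - lo ≤ fuel →
      PFeas l hi → (∀ j : Nat, j < lo → ¬ PFeas l j) →
      ∃ L : Nat, bsearchB l F (tgt l) fuel lo hi = some (L : Int) ∧
        PFeas l L ∧ (∀ j : Nat, j < L → ¬ PFeas l j) := by
  intro fuel
  induction fuel with
  | zero =>
    intro lo hi hlh hhn hfuel hPhi hlow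
    have : lo = hi := by omega
    subst this
    exact ⟨lo, by simp [bsearchB], hPhi, hlow⟩
  | succ fuel ih =>
    intro lo hi hlh hhn hfuel hPhi hlow
    by_cases hlt : lo < hi
    · have hmid1 : lo ≤ (lo + hi) / 2 := by omega
      have hmid2 : (lo + hi) / 2 < hi := by omega
      obtain ⟨bres, hfeas, hiff⟩ := feasibleB_spec hp hF (show (lo + hi) / 2 ≤ l.length by omega)
      cases bres with
      | true =>
        obtain ⟨L, hrec, h1, h2⟩ := ih lo ((lo + hi) / 2) (by omega) (by omega) (by omega)
          (hiff.mp rfl) hlow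
        exact ⟨L, by rw [bsearchB, if_pos hlt]; simpa [hfeas] using hrec, h1, h2⟩
      | false =>
        have hnP : ¬ PFeas l ((lo + hi) / 2) := fun h => by simpa using hiff.mpr h
        have hlow' : ∀ j : Nat, j < (lo + hi) / 2 + 1 → ¬ PFeas l j := by
          intro j hj hPj
          rcases Nat.lt_or_ge j lo with h | h
          · exact hlow j h hPj
          · exact hnP (PFeas_mono (by omega) (by omega) hPj)
        obtain ⟨L, hrec, h1, h2⟩ := ih ((lo + hi) / 2 + 1) hi (by omega) hhn (by omega) hPhi hlow'
        exact ⟨L, by rw [bsearchB, if_pos hlt]; simpa [hfeas] using hrec, h1, h2⟩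
    · have : lo = hi := by omega
      subst this
      exact ⟨lo, by simp [bsearchB], hPhi, hlow⟩

lemma bsearchB_isMin {l : List Char} {F : PySem.Dict Char Int}
    (hp : ∀ c ∈ l, c ∈ asdf) (hF : DRepr F (fun c => (l.count c : Int))) :
    ∃ m, bsearchB l F (tgt l) (l.length + 1) 0 l.length = some m ∧ MinLen l m := by
  obtain ⟨L, hrun, hPL, hleast⟩ := bsearchB_run hp hF (l.length + 1) 0 l.length (by omega)
    (le_refl _) (by omega) (PFeas_full l) (by omega)
  obtain ⟨i, hi, hf⟩ := hPL
  refine ⟨(L : Int), hrun, ⟨i, i + L, by omega, hi, hf, by push_cast; ring⟩, ?_⟩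
  intro i' j' hij hj hfe
  have hP' : PFeas l (j' - i') := by
    refine ⟨i', by omega, ?_⟩
    have : i' + (j' - i') = j' := by omega
    rw [this]; exact hfe
  have : L ≤ j' - i' := by
    by_contra hcon
    exact hleast (j' - i') (by omega) hP'
  omega


-- ===== VERDICT (by name: the statement is the Claim_ definition above) =====
lemma tgt_eq (l : List Char) : PySem.Int.floordiv (l.length : Int) 4 = tgt l := by
  exact_mod_cast PySem.Int.floordiv_natCast l.length 4

lemma aux_eq {l : List Char} (hp : ∀ c ∈ l, c ∈ asdf) : solutionAux l = solutionAltAux l := by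
  obtain ⟨F, hFeq, hrep⟩ := buildFreq_spec hp
  unfold solutionAux solutionAltAux
  rw [hFeq, Option.bind_some, Option.bind_some, tgt_eq]
  by_cases hbal : isBalanced F (tgt l) = true
  · rw [if_pos hbal, if_pos hbal]
  · rw [if_neg hbal, if_neg hbal]
    have hnb : ∀ k, ¬ feas l k k :=
      not_feas_self hp (fun h => hbal ((isBalanced_iff hrep (tgt l)).mpr h))
    obtain ⟨mA, hA, hAmin⟩ := outerA_isMin hp hrep hnb
    obtain ⟨mB, hB, hBmin⟩ := bsearchB_isMin hp hrep
    rw [hA, hB, MinLen_unique hAmin hBmin]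

theorem solution_spec : Claim_equal_solution := by
  intro input _ hpre
  have hp : ∀ c ∈ input.toList, c ∈ asdf := by
    intro c hc
    have := (List.all_eq_true.mp hpre) c hc
    simp only [Bool.or_eq_true, beq_iff_eq] at this
    rcases this with ((h | h) | h) | h <;> simp [asdf, h]
  unfold Spec_solution solution solution_alt
  rw [aux_eq hp]
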